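-- pv_equiv track=rewrite | github.com/arinablake/jobeasy-algorithms-course | hw1/codewars/evil_or_odious.py | evil
-- ===== SOURCE A (Python) =====
-- def evil(n):
--     bin_n = bin(n)[2:]
--     count1 = 0
--     for i in bin_n:
--         if i == str(1):
--             count1 += 1
--     if count1 % 2 == 0:
--         return "It's Evil!"
--     else:
--         return "It's Odious!"
-- ===== SOURCE B (Python) =====
-- def evil(n):
--     # Parity fold: XOR the high half of the bits into the low half, halving the
--     # bit-length each round; popcount parity is preserved, so m ends as the parity bit.
--     m = abs(n)
--     while m > 1:
--         s = m.bit_length() // 2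
--         m = (m >> s) ^ (m & ((1 << s) - 1))
--     return "It's Evil!" if m == 0 else "It's Odious!"
-- ===== Notes on version B (the rewrite author's own statement) =====
-- stated objective: alternative
-- what changed: B never builds a binary string and never visits bits one by one: it repeatedly XOR-folds the high half of abs(n)'s bits onto the low half (a divide-and-conquer parity fold that halves the bit-length each round, O(log log n) rounds), leaving the popcount parity as the final bit, instead of A's per-character scan of bin(n)[2:] counting '1's and taking mod 2.
import Mathlib
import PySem

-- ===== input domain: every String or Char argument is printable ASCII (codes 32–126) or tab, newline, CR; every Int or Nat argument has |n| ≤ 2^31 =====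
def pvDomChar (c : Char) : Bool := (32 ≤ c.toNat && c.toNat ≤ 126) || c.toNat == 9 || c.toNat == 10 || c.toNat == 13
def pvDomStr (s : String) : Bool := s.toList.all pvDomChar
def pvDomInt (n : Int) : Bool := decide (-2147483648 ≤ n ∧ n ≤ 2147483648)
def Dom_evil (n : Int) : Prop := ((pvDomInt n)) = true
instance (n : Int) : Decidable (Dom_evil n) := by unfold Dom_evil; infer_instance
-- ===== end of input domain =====

-- ===== PORT A =====
-- B replaces A's build-bin(n)-string-and-count-'1'-chars pass by a divide-and-conquer
-- XOR fold of abs(n)'s halves that leaves only the popcount parity bit; alternative, same honesty about cost.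
def evil (n : Int) : String :=
  let bin_n : String := PySem.Str.slice (PySem.Int.pyBin n) (some 2) none
  let count1 : Int :=
    bin_n.toList.foldl (fun c i => if i == '1' then c + 1 else c) 0
  if PySem.Int.mod count1 2 == 0 then "It's Evil!" else "It's Odious!"

-- ===== PORT B =====
-- termination measure for the fold loop: the folded value strictly decreases
theorem evilFold_dec (m : Nat) (h : 1 < m) :
    (m >>> (PySem.Int.bitLength (m : Int) / 2)) ^^^
      (m &&& ((1 <<< (PySem.Int.bitLength (m : Int) / 2)) - 1)) < m := by
  set L := PySem.Int.bitLength (m : Int) with hL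
  have hmlt : m < 2 ^ L := by
    simpa using PySem.Int.lt_two_pow_bitLength (m : Int)
  have hmge : 2 ^ (L - 1) ≤ m := by
    have := PySem.Int.two_pow_bitLength_le (m : Int) (by exact_mod_cast (by omega : m ≠ 0))
    simpa using this
  have hL2 : 2 ≤ L := by
    by_contra hc
    have h2 : 2 ^ L ≤ 2 := by
      calc 2 ^ L ≤ 2 ^ 1 := Nat.pow_le_pow_right (by omega) (by omega)
        _ = 2 := by norm_num
    omega
  set s := L / 2 with hs
  have hs1 : 1 ≤ s := by omega
  have hsle : s ≤ L - s := by omega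
  have ha : m >>> s < 2 ^ (L - s) := by
    rw [Nat.shiftRight_eq_div_pow]
    have : m < 2 ^ (L - s) * 2 ^ s := by
      rw [← pow_add]
      have : L - s + s = L := by omega
      rw [this]; exact hmlt
    exact (Nat.div_lt_iff_lt_mul (by positivity)).mpr this
  have hb : m &&& ((1 <<< s) - 1) < 2 ^ (L - s) := by
    rw [Nat.one_shiftLeft, Nat.and_two_pow_sub_one_eq_mod]
    calc m % 2 ^ s < 2 ^ s := Nat.mod_lt _ (by positivity)
      _ ≤ 2 ^ (L - s) := Nat.pow_le_pow_right (by omega) hsle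
  calc (m >>> s) ^^^ (m &&& ((1 <<< s) - 1)) < 2 ^ (L - s) := Nat.xor_lt_two_pow ha hb
    _ ≤ 2 ^ (L - 1) := Nat.pow_le_pow_right (by omega) (by omega)
    _ ≤ m := hmge

-- while m > 1: s = m.bit_length() // 2; m = (m >> s) ^ (m & ((1 << s) - 1))
def evilFoldLoop (m : Nat) : Nat :=
  if h : 1 < m then
    let s := PySem.Int.bitLength (m : Int) / 2
    evilFoldLoop ((m >>> s) ^^^ (m &&& ((1 <<< s) - 1)))
  else m
  decreasing_by exact evilFold_dec m h

def evil_alt (n : Int) : String :=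
  if evilFoldLoop n.natAbs = 0 then "It's Evil!" else "It's Odious!"

-- ===== PRECONDITION & SPEC =====
def Spec_evil (n : Int) (out : String) : Prop := out = evil_alt n
instance (n : Int) (out : String) : Decidable (Spec_evil n out) := by unfold Spec_evil; infer_instance

-- ===== CLAIM (what is proved, stated in full; the proofs are below) =====
def Claim_equal_evil : Prop := ∀ (n : Int), Dom_evil n → Spec_evil n (evil n)

-- ===== LEMMAS AND PROOFS =====

-- number of set bits (helper for the proofs only)
def evilPopcnt (m : Nat) : Nat :=
  if h : m = 0 then 0 else m % 2 + evilPopcnt (m / 2)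
  decreasing_by exact Nat.div_lt_self (Nat.pos_of_ne_zero h) (by omega)

theorem evilPopcnt_zero : evilPopcnt 0 = 0 := by
  rw [evilPopcnt]; simp

theorem evilPopcnt_rec (x : Nat) : evilPopcnt x = x % 2 + evilPopcnt (x / 2) := by
  by_cases h : x = 0
  · simp [h, evilPopcnt]
  · rw [evilPopcnt]; simp [h]

theorem xor_mod_two (a b : Nat) : (a ^^^ b) % 2 = (a % 2) ^^^ (b % 2) := by
  rw [← Nat.and_one_is_mod, ← Nat.and_one_is_mod, ← Nat.and_one_is_mod,
    Nat.and_xor_distrib_right]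

theorem evilPopcnt_xor (a : Nat) :
    ∀ b, evilPopcnt (a ^^^ b) % 2 = (evilPopcnt a + evilPopcnt b) % 2 := by
  induction a using Nat.strong_induction_on with
  | _ a ih =>
    intro b
    by_cases h0 : a = 0
    · simp [h0, evilPopcnt_zero]
    · rw [evilPopcnt_rec (a ^^^ b), evilPopcnt_rec a, evilPopcnt_rec b,
        Nat.xor_div_two, xor_mod_two]
      have hi := ih (a / 2) (Nat.div_lt_self (Nat.pos_of_ne_zero h0) (by omega)) (b / 2)
      rcases Nat.mod_two_eq_zero_or_one a with ha | ha <;>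
        rcases Nat.mod_two_eq_zero_or_one b with hb | hb <;>
        simp [ha, hb] <;> omega

theorem evilPopcnt_split (s : Nat) :
    ∀ m, evilPopcnt m = evilPopcnt (m / 2 ^ s) + evilPopcnt (m % 2 ^ s) := by
  induction s with
  | zero => intro m; simp [pow_zero, Nat.div_one, Nat.mod_one, evilPopcnt_zero]
  | succ s ih =>
    intro m
    have h1 : m / 2 ^ (s + 1) = m / 2 / 2 ^ s := by
      rw [Nat.div_div_eq_div_mul, pow_succ, mul_comm]
    have h2 : m % 2 ^ (s + 1) % 2 = m % 2 := by
      apply Nat.mod_mod_of_dvd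
      exact dvd_pow_self 2 (by omega)
    have h3 : m % 2 ^ (s + 1) / 2 = m / 2 % 2 ^ s := by
      have : (2 : Nat) ^ (s + 1) = 2 * 2 ^ s := by rw [pow_succ, mul_comm]
      rw [this, Nat.mod_mul_right_div_self]
    rw [evilPopcnt_rec m, evilPopcnt_rec (m % 2 ^ (s + 1)), h1, h2, h3, ih (m / 2)]
    omega

theorem evilFoldLoop_eq (m : Nat) : evilFoldLoop m = evilPopcnt m % 2 := by
  induction m using Nat.strong_induction_on with
  | _ m ih =>
    rw [evilFoldLoop]
    by_cases h : 1 < m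
    · rw [dif_pos h]
      set s := PySem.Int.bitLength (m : Int) / 2 with hs
      rw [ih _ (evilFold_dec m h)]
      rw [Nat.shiftRight_eq_div_pow, Nat.one_shiftLeft, Nat.and_two_pow_sub_one_eq_mod,
        evilPopcnt_xor, evilPopcnt_split s m]
    · rw [dif_neg h]
      interval_cases m
      · simp [evilPopcnt_zero]
      · rw [evilPopcnt_rec, evilPopcnt_zero]

theorem toDigitsCore_count_one (f : Nat) :
    ∀ (n : Nat) (ds : List Char), n < 2 ^ f →
      (Nat.toDigitsCore 2 f n ds).count '1' = evilPopcnt n + ds.count '1' := by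
  induction f with
  | zero =>
    intro n ds hn
    interval_cases n
    simp [Nat.toDigitsCore, evilPopcnt]
  | succ f ih =>
    intro n ds hn
    rw [Nat.toDigitsCore]
    by_cases h2 : n / 2 = 0
    · have hn2 : n < 2 := by omega
      interval_cases n <;> simp [h2, Nat.digitChar, evilPopcnt] <;> omega
    · have hne : n ≠ 0 := by omega
      simp only [h2, if_false]
      rw [ih (n / 2) _ (by rw [pow_succ] at hn; omega)]
      have hrec : evilPopcnt n = n % 2 + evilPopcnt (n / 2) := by
        rw [evilPopcnt]; simp [hne]
      rw [hrec]
      rcases Nat.mod_two_eq_zero_or_one n with h | h <;>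
        simp [h, Nat.digitChar] <;> omega

theorem toDigits_count_one (n : Nat) :
    (Nat.toDigits 2 n).count '1' = evilPopcnt n := by
  have := toDigitsCore_count_one (n + 1) n [] (Nat.lt_two_pow_self.trans_le (by
    exact Nat.pow_le_pow_right (by omega) (by omega)))
  simpa [Nat.toDigits] using this

theorem evil_chars_count (n : Int) :
    ((PySem.Str.slice (PySem.Int.pyBin n) (some 2) none).toList).count '1'
      = evilPopcnt n.natAbs := by
  rw [PySem.Str.toList_slice, PySem.Int.toList_pyBin, PySem.Chars.slice_eq_listSlice]
  have hsl : PySem.List.slice (PySem.Int.toBinChars0b n) (some 2) none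
      = List.drop 2 (PySem.Int.toBinChars0b n) := by
    simpa using PySem.List.slice_from (xs := PySem.Int.toBinChars0b n) (by omega : (0:Int) ≤ 2)
  rw [hsl]
  unfold PySem.Int.toBinChars0b
  by_cases h : n < 0
  · have : n.toNat = 0 := by omega
    simp [h, toDigits_count_one]
  · have : n.natAbs = n.toNat := by omega
    simp [h, this, toDigits_count_one]

-- ===== VERDICT (by name: the statement is the Claim_ definition above) =====
theorem evil_spec : Claim_equal_evil := by
  intro n _
  unfold Spec_evil
  simp only [evil, evil_alt]
  rw [PySem.List.foldl_count_if (fun i => i == '1')]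
  rw [show List.countP (fun i => i == '1')
        (PySem.Str.slice (PySem.Int.pyBin n) (some 2) none).toList
      = List.count '1' (PySem.Str.slice (PySem.Int.pyBin n) (some 2) none).toList from rfl]
  rw [evil_chars_count, evilFoldLoop_eq]
  have hm : PySem.Int.mod ((0 : Int) + (evilPopcnt n.natAbs : Int)) 2
      = ((evilPopcnt n.natAbs % 2 : Nat) : Int) := by
    rw [zero_add]
    exact_mod_cast PySem.Int.mod_natCast (evilPopcnt n.natAbs) 2
  rw [hm]
  rcases Nat.mod_two_eq_zero_or_one (evilPopcnt n.natAbs) with h | h <;> simp [h]
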